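-- pv_equiv track=rewrite | github.com/Rattko/Markdown-Project | DataController.py | __count_whitespaces
-- ===== SOURCE A (Python) =====
-- def __count_whitespaces(line):
--     """
--     Count trailing whitespaces for a further processing;
--
--     PARAMETERS
--     ----------
--     line : str
--         Contains text which we'll be processing;
--
--     RETURNS
--     -------
--     spaces, tabs : int, int
--         Contains number of spaces or tabs, respectively;
--     """
--
--     spaces, tabs = 0, 0
--
--     for char in line:
--         if char == ' ':
--             spaces += 1
--         elif char == '\t':
--             tabs += 1
--         else:
--             break
--
--     return spaces, tabs
-- ===== SOURCE B (Python) =====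
-- def __count_whitespaces(line):
--     prefix = line[:len(line) - len(line.lstrip(' \t'))]
--     return prefix.count(' '), prefix.count('\t')
-- ===== Notes on version B (the rewrite author's own statement) =====
-- stated objective: simpler
-- what changed: Replaces the manual branching accumulator loop with break by an extract-then-count decomposition: slice off the leading space/tab prefix via lstrip and count each character with str.count.
import Mathlib
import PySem

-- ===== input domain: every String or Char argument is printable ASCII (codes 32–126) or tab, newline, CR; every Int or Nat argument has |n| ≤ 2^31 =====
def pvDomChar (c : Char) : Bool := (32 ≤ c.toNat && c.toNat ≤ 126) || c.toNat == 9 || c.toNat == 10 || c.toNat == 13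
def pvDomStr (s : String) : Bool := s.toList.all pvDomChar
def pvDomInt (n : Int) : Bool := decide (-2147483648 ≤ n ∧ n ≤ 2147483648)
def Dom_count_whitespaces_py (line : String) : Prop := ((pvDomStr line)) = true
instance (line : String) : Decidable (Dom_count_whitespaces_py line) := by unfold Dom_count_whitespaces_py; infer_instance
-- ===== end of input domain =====

-- ===== PORT A =====
-- B simplifies A's branching accumulator loop into extract-then-count via lstrip/count (return value only).
-- Loop with break: stops at the first char that is neither ' ' nor '\t'.
def cwA_loop : List Char → Int → Int → Int × Int
  | [], spaces, tabs => (spaces, tabs)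
  | c :: rest, spaces, tabs =>
      if c = ' ' then cwA_loop rest (spaces + 1) tabs
      else if c = '\t' then cwA_loop rest spaces (tabs + 1)
      else (spaces, tabs)

def count_whitespaces_py (line : String) : Int × Int :=
  cwA_loop line.toList 0 0

-- ===== PORT B =====
def count_whitespaces_py_alt (line : String) : Int × Int :=
  let cs := line.toList
  -- line.lstrip(' \t'): drop leading chars from the set {' ', '\t'} (exact)
  let stripped := cs.dropWhile (fun c => c == ' ' || c == '\t')
  -- line[:len(line) - len(stripped)]
  let pre := PySem.List.slice cs none (some ((cs.length : Int) - (stripped.length : Int)))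
  -- prefix.count(' '), prefix.count('\t') (single-char str.count = List.count)
  ((pre.count ' ' : Int), (pre.count '\t' : Int))

-- ===== PRECONDITION & SPEC =====
def Spec_count_whitespaces_py (line : String) (out : Int × Int) : Prop := out = count_whitespaces_py_alt line
instance (line : String) (out : Int × Int) : Decidable (Spec_count_whitespaces_py line out) := by unfold Spec_count_whitespaces_py; infer_instance

-- ===== CLAIM (what is proved, stated in full; the proofs are below) =====
def Claim_equal_count_whitespaces_py : Prop := ∀ (line : String), Dom_count_whitespaces_py line → Spec_count_whitespaces_py line (count_whitespaces_py line)

-- ===== LEMMAS AND PROOFS =====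

lemma cwA_loop_eq (cs : List Char) (s t : Int) :
    cwA_loop cs s t =
      (s + ((cs.takeWhile (fun c => c == ' ' || c == '\t')).count ' ' : Int),
       t + ((cs.takeWhile (fun c => c == ' ' || c == '\t')).count '\t' : Int)) := by
  induction cs generalizing s t with
  | nil => simp [cwA_loop]
  | cons c rest ih =>
    by_cases hs : c = ' '
    · subst hs
      simp [cwA_loop, ih]
      omega
    · by_cases ht : c = '\t'
      · subst ht
        simp [cwA_loop, ih]
        omega
      · have hp : (fun c => c == ' ' || c == '\t') c = false := by
          simp [hs, ht]
        simp [cwA_loop, hs, ht, hp]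

lemma take_sub_dropWhile (cs : List Char) (p : Char → Bool) :
    cs.take (cs.length - (cs.dropWhile p).length) = cs.takeWhile p := by
  have hlen : (cs.takeWhile p).length + (cs.dropWhile p).length = cs.length := by
    rw [← List.length_append, List.takeWhile_append_dropWhile]
  have hn : cs.length - (cs.dropWhile p).length = (cs.takeWhile p).length := by omega
  rw [hn]
  exact ((List.prefix_iff_eq_take).mp (List.takeWhile_prefix p)).symm

-- ===== VERDICT (by name: the statement is the Claim_ definition above) =====
theorem count_whitespaces_py_spec : Claim_equal_count_whitespaces_py := by
  intro line _
  unfold Spec_count_whitespaces_py count_whitespaces_py count_whitespaces_py_alt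
  set cs := line.toList with hcs
  set p : Char → Bool := fun c => c == ' ' || c == '\t' with hp
  have hd : (cs.dropWhile p).length ≤ cs.length := List.length_dropWhile_le _ _
  have hb : (0 : Int) ≤ (cs.length : Int) - ((cs.dropWhile p).length : Int) := by
    omega
  rw [cwA_loop_eq]
  dsimp only
  rw [PySem.List.slice_to]
  have htn : ((cs.length : Int) - ((cs.dropWhile p).length : Int)).toNat
      = cs.length - (cs.dropWhile p).length := by omega
  rw [htn, take_sub_dropWhile]
  simp
  constructor <;> rw [hp]
  exact hb
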